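-- pv_equiv track=rewrite | github.com/GabrielF4/Codewars-challenges | challenge_9.py | all_nines
-- ===== SOURCE A (Python) =====
-- def all_nines(x):
--     if x % 2 == 0 or x % 5 == 0:
--         return -1
--
--     for i in range(1, 4000):
--         num_str = str('9' * i)
--         num = int(num_str)
--         if num % x == 0:
--             return num // x
--
--     return -1
-- ===== SOURCE B (Python) =====
-- def all_nines(x):
--     if x % 2 == 0 or x % 5 == 0:
--         return -1
--     rem = 0
--     for i in range(1, 4000):
--         rem = (rem * 10 + 9) % x
--         if rem == 0:
--             return (10 ** i - 1) // x
--     return -1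
-- ===== Notes on version B (the rewrite author's own statement) =====
-- stated objective: faster
-- what changed: Instead of building the i-digit string of nines and converting it to a big integer at every iteration, B tracks the remainder of the repunit-of-9s modulo x incrementally via rem = (rem*10+9) % x and performs the single big division only when the remainder hits zero.
import Mathlib
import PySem

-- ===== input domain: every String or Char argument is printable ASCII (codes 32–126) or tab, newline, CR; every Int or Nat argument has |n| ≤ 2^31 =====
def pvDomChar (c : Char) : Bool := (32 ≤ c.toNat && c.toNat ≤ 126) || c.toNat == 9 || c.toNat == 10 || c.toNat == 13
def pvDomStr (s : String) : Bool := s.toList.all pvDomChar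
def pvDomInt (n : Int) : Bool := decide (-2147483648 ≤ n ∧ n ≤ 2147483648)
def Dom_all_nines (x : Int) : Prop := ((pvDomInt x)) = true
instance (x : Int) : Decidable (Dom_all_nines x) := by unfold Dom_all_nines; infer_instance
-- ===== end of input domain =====

-- B replaces A's per-iteration big-integer string build + parse + modulo with an incremental
-- word-sized remainder rem = (rem*10+9) % x and a single big division at the hit (objective: faster).

-- ===== PORT A =====
-- int(num_str) ported by hand (PySem.Int.ofChars? exists but its digit loop is a private
-- definition no lemma can reach): pvDigitsVal is exact for Python's int() on the argument
-- actually passed here, a nonempty all-ASCII-digit string '9'*i with i ≥ 1.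
def pvDigitsVal (acc : Int) : List Char → Int
  | [] => acc
  | c :: cs => pvDigitsVal (acc * 10 + ((c.toNat : Int) - 48)) cs

def pvLoopA (x : Int) : List Int → Int
  | [] => -1                                                -- fell through the for: return -1
  | i :: rest =>
      let numStr : List Char := List.replicate i.toNat '9'  -- num_str = str('9' * i)
      let num : Int := pvDigitsVal 0 numStr                 -- num = int(num_str)
      if PySem.Int.mod num x = 0 then PySem.Int.floordiv num x
      else pvLoopA x rest

def all_nines (x : Int) : Int :=
  if PySem.Int.mod x 2 = 0 ∨ PySem.Int.mod x 5 = 0 then -1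
  else pvLoopA x (PySem.List.pyRange 1 4000)

-- ===== PORT B =====
def pvLoopB (x : Int) (rem : Int) : List Int → Int
  | [] => -1
  | i :: rest =>
      let rem' : Int := PySem.Int.mod (rem * 10 + 9) x      -- rem = (rem * 10 + 9) % x
      if rem' = 0 then PySem.Int.floordiv (10 ^ i.toNat - 1) x   -- (10 ** i - 1) // x
      else pvLoopB x rem' rest

def all_nines_alt (x : Int) : Int :=
  if PySem.Int.mod x 2 = 0 ∨ PySem.Int.mod x 5 = 0 then -1
  else pvLoopB x 0 (PySem.List.pyRange 1 4000)

-- ===== PRECONDITION & SPEC =====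
def Spec_all_nines (x : Int) (out : Int) : Prop := out = all_nines_alt x
instance (x : Int) (out : Int) : Decidable (Spec_all_nines x out) := by unfold Spec_all_nines; infer_instance

-- ===== CLAIM (what is proved, stated in full; the proofs are below) =====
def Claim_equal_all_nines : Prop := ∀ (x : Int), Dom_all_nines x → Spec_all_nines x (all_nines x)

-- ===== LEMMAS AND PROOFS =====

-- int() of the i-nines digit string is 10^i - 1 (generalised over the accumulator).
theorem pvDigitsVal_nines (n : Nat) : ∀ acc : Int,
    pvDigitsVal acc (List.replicate n '9') = acc * 10 ^ n + (10 ^ n - 1) := by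
  induction n with
  | zero => intro acc; simp [pvDigitsVal]
  | succ n ih =>
      intro acc
      have h9 : (('9'.toNat : Int) - 48) = 9 := by decide
      rw [List.replicate_succ]
      show pvDigitsVal (acc * 10 + (('9'.toNat : Int) - 48)) (List.replicate n '9') = _
      rw [h9, ih, pow_succ]
      ring

-- reducing the left operand modulo x first does not change (a*c + d) % x
theorem pvFmod_mul_add (a x c d : Int) :
    Int.fmod (Int.fmod a x * c + d) x = Int.fmod (a * c + d) x := by
  conv_rhs => rw [Int.add_fmod, Int.mul_fmod]
  rw [Int.add_fmod, Int.mul_fmod, Int.fmod_fmod]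

-- loop invariant: B's carried remainder is (10^(j-1) - 1) % x when the next index is j
theorem pvLoop_eq (x : Int) : ∀ (n : Nat) (j : Int), 1 ≤ j → 4000 - j = (n : Int) →
    pvLoopA x (PySem.List.pyRange j 4000) =
      pvLoopB x (Int.fmod (10 ^ (j - 1).toNat - 1) x) (PySem.List.pyRange j 4000) := by
  intro n
  induction n with
  | zero =>
      intro j h1 h0
      have hj : j = 4000 := by omega
      subst hj
      have hnil : PySem.List.pyRange (4000 : Int) 4000 = [] := by decide
      rw [hnil]
      rfl
  | succ n ih =>
      intro j h1 hn
      have hlt : j < 4000 := by omega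
      rw [PySem.List.pyRange_one_cons hlt]
      have hjn : j.toNat = (j - 1).toNat + 1 := by omega
      have hnum : pvDigitsVal 0 (List.replicate j.toNat '9') = 10 ^ j.toNat - 1 := by
        rw [pvDigitsVal_nines]; ring
      have hrem : Int.fmod (Int.fmod (10 ^ (j - 1).toNat - 1) x * 10 + 9) x
          = Int.fmod (10 ^ j.toNat - 1) x := by
        rw [pvFmod_mul_add]
        congr 1
        rw [hjn, pow_succ]
        ring
      simp only [pvLoopA, pvLoopB, PySem.Int.mod, hnum, hrem]
      by_cases hc : Int.fmod (10 ^ j.toNat - 1) x = 0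
      · simp [hc]
      · simp only [hc, if_false]
        have := ih (j + 1) (by omega) (by omega)
        simpa [show j + 1 - 1 = j by ring] using this

-- ===== VERDICT (by name: the statement is the Claim_ definition above) =====
theorem all_nines_spec : Claim_equal_all_nines := by
  intro x _
  show all_nines x = all_nines_alt x
  unfold all_nines all_nines_alt
  split_ifs with h
  · rfl
  · have := pvLoop_eq x 3999 1 (by norm_num) (by norm_num)
    simpa [Int.zero_fmod] using this
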